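-- pv_equiv track=rewrite | github.com/wishjsh/Programmers | 프로그래머스/1/388351. 유연근무제/유연근무제.py | check
-- ===== SOURCE A (Python) =====
-- def time1(s_time):
--     hour = s_time // 100 #시
--     try:
--         minutes = s_time % 100 #분
--     except ZeroDivisionError:
--         minutes = 0
--
--     return hour*60 + minutes
--
-- def check(s_time ,e_time, startday):
--         for i in e_time:
--             if(time1(i) <= time1(s_time) + 10 or startday in [6,7]):
--                 pass
--             else:
--                 return 0
--             startday += 1
--             if(startday > 7):
--                 startday -= 7
--         return 1
-- ===== SOURCE B (Python) =====
-- def time1(s_time):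
--     hour = s_time // 100
--     try:
--         minutes = s_time % 100
--     except ZeroDivisionError:
--         minutes = 0
--     return hour*60 + minutes
--
--
-- def check(s_time, e_time, startday):
--     limit = time1(s_time) + 10
--     # materialise the day schedule for the whole period
--     days = []
--     d = startday
--     for _ in e_time:
--         days.append(d)
--         d = d + 1 if d < 7 else d - 6
--     # indices that fall on a weekend, and indices whose arrival is too late
--     weekend = [i for i, d in enumerate(days) if d in (6, 7)]
--     offenders = [i for i, t in enumerate(e_time) if time1(t) > limit]
--     # the rule holds iff every late arrival happened on a weekend
--     return 1 if all(i in weekend for i in offenders) else 0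
-- ===== Notes on version B (the rewrite author's own statement) =====
-- stated objective: alternative
-- what changed: B replaces A's fused early-return scan with a mutable wrapping day counter by three staged passes: it materialises the day schedule as a list, extracts the set of weekend indices and the set of too-late indices with comprehensions, and returns 1 iff the late indices are contained in the weekend indices.
import Mathlib
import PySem

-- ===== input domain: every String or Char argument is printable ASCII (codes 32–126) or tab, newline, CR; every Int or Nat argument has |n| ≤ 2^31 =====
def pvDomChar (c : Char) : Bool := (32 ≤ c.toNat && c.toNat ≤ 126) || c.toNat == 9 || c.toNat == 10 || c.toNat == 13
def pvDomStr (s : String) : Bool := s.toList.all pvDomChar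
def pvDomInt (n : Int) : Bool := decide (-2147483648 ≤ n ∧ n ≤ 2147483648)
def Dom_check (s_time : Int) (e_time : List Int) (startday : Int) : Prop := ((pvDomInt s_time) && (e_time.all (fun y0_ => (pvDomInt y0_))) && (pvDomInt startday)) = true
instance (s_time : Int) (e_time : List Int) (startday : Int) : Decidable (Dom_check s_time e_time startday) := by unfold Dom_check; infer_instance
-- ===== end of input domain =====

-- B replaces A's fused early-return scan (mutable wrapping day counter) by staged passes:
-- schedule list, weekend-index list, late-index list, containment test. Alternative decomposition, no speed claim.

-- ===== PORT A =====
-- helper time1: the try/except is dead code (divisor 100 is never 0), so it is a straight floordiv/mod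
def time1Port (s_time : Int) : Int :=
  PySem.Int.floordiv s_time 100 * 60 + PySem.Int.mod s_time 100

def checkGo (s_time : Int) : List Int → Int → Int
  | [], _ => 1
  | t :: ts, startday =>
    if time1Port t ≤ time1Port s_time + 10 ∨ startday = 6 ∨ startday = 7 then
      checkGo s_time ts (if startday + 1 > 7 then startday + 1 - 7 else startday + 1)
    else 0

def check (s_time : Int) (e_time : List Int) (startday : Int) : Int :=
  checkGo s_time e_time startday

-- ===== PORT B =====
-- the loop building `days`: fold over e_time with state (days so far, current day)
def daysStep (st : List Int × Int) (_t : Int) : List Int × Int :=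
  (st.1 ++ [st.2], if st.2 < 7 then st.2 + 1 else st.2 - 6)

-- the two index comprehensions of Source B
def weekendIdx (days : List Int) : List Int :=
  ((PySem.List.enumerate days).filter (fun p => p.2 = 6 || p.2 = 7)).map (·.1)

def offenderIdx (limit : Int) (e_time : List Int) : List Int :=
  ((PySem.List.enumerate e_time).filter (fun p => decide (time1Port p.2 > limit))).map (·.1)

def check_alt (s_time : Int) (e_time : List Int) (startday : Int) : Int :=
  let limit := time1Port s_time + 10
  let days := (e_time.foldl daysStep ([], startday)).1
  let weekend := weekendIdx days
  let offenders := offenderIdx limit e_time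
  if offenders.all (fun i => weekend.contains i) then 1 else 0

-- ===== PRECONDITION & SPEC =====
def Spec_check (s_time : Int) (e_time : List Int) (startday : Int) (out : Int) : Prop := out = check_alt s_time e_time startday
instance (s_time : Int) (e_time : List Int) (startday : Int) (out : Int) : Decidable (Spec_check s_time e_time startday out) := by unfold Spec_check; infer_instance

-- ===== CLAIM (what is proved, stated in full; the proofs are below) =====
def Claim_equal_check : Prop := ∀ (s_time : Int) (e_time : List Int) (startday : Int), Dom_check s_time e_time startday → Spec_check s_time e_time startday (check s_time e_time startday)

-- ===== LEMMAS AND PROOFS =====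

-- proof-side recursive form of the schedule list (B builds it with a foldl)
def daysR : List Int → Int → List Int
  | [], _ => []
  | _ :: ts, d => d :: daysR ts (if d < 7 then d + 1 else d - 6)

theorem foldl_daysStep (ts : List Int) : ∀ (acc : List Int) (d : Int),
    (ts.foldl daysStep (acc, d)).1 = acc ++ daysR ts d := by
  induction ts with
  | nil => intro acc d; simp [daysR]
  | cons t ts ih =>
    intro acc d
    simp only [List.foldl_cons, daysStep, daysR]
    rw [ih]
    simp

theorem wrap_eq (d : Int) :
    (if d + 1 > 7 then d + 1 - 7 else d + 1) = (if d < 7 then d + 1 else d - 6) := by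
  split_ifs <;> omega

-- the common Boolean form both sides reduce to
def good (s : Int) : List Int → Int → Bool
  | [], _ => true
  | t :: ts, d =>
    (decide (time1Port t ≤ time1Port s + 10) || decide (d = 6) || decide (d = 7))
      && good s ts (if d < 7 then d + 1 else d - 6)

theorem checkGo_eq_good (s : Int) : ∀ (ts : List Int) (d : Int),
    checkGo s ts d = (if good s ts d then 1 else 0) := by
  intro ts
  induction ts with
  | nil => intro d; simp [checkGo, good]
  | cons t ts ih =>
    intro d
    simp only [checkGo, good, wrap_eq]
    by_cases hc : time1Port t ≤ time1Port s + 10 ∨ d = 6 ∨ d = 7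
    · rw [if_pos hc, ih]
      rcases hc with h | h | h <;> simp [h]
    · rw [if_neg hc]
      rw [not_or, not_or] at hc
      simp [hc.1, hc.2.1, hc.2.2]

-- start-indexed forms of the two comprehensions, for the induction
def wkAux (ds : List Int) (j : Int) : List Int :=
  ((PySem.List.enumerate ds j).filter (fun p => p.2 = 6 || p.2 = 7)).map (·.1)

def offAux (s : Int) (ts : List Int) (j : Int) : List Int :=
  ((PySem.List.enumerate ts j).filter (fun p => decide (time1Port p.2 > time1Port s + 10))).map (·.1)

theorem off_nil (s : Int) (j : Int) : offAux s [] j = [] := rfl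

theorem wk_cons (d : Int) (ds : List Int) (j : Int) :
    wkAux (d :: ds) j =
      if d = 6 ∨ d = 7 then j :: wkAux ds (j + 1) else wkAux ds (j + 1) := by
  unfold wkAux
  rw [PySem.List.enumerate_cons, List.filter_cons]
  by_cases h : d = 6 ∨ d = 7
  · rw [if_pos h]
    have hb : ((fun p : Int × Int => p.2 = 6 || p.2 = 7) (j, d)) = true := by
      rcases h with h | h <;> simp [h]
    rw [if_pos hb, List.map_cons]
  · rw [if_neg h]
    rw [not_or] at h
    have hb : ¬ ((fun p : Int × Int => p.2 = 6 || p.2 = 7) (j, d)) = true := by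
      simp [h.1, h.2]
    rw [if_neg hb]

theorem off_cons (s t : Int) (ts : List Int) (j : Int) :
    offAux s (t :: ts) j =
      if time1Port t > time1Port s + 10 then j :: offAux s ts (j + 1) else offAux s ts (j + 1) := by
  unfold offAux
  rw [PySem.List.enumerate_cons, List.filter_cons]
  by_cases h : time1Port t > time1Port s + 10
  · rw [if_pos h, if_pos (by simpa using h), List.map_cons]
  · rw [if_neg h, if_neg (by simpa using h)]

theorem wk_ge (ds : List Int) (j i : Int) (hi : i ∈ wkAux ds j) : j ≤ i := by
  unfold wkAux at hi
  rw [List.mem_map] at hi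
  obtain ⟨p, hp, rfl⟩ := hi
  have hp' := List.mem_of_mem_filter hp
  rw [PySem.List.mem_enumerate_iff] at hp'
  obtain ⟨k, hk, rfl⟩ := hp'
  simp only []
  omega

theorem off_ge (s : Int) (ts : List Int) (j i : Int) (hi : i ∈ offAux s ts j) : j ≤ i := by
  unfold offAux at hi
  rw [List.mem_map] at hi
  obtain ⟨p, hp, rfl⟩ := hi
  have hp' := List.mem_of_mem_filter hp
  rw [PySem.List.mem_enumerate_iff] at hp'
  obtain ⟨k, hk, rfl⟩ := hp'
  simp only []
  omega

theorem all_congr_mem {α : Type} (l : List α) (f g : α → Bool)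
    (h : ∀ x ∈ l, f x = g x) : l.all f = l.all g := by
  induction l with
  | nil => rfl
  | cons a l ih =>
    rw [List.all_cons, List.all_cons, h a List.mem_cons_self,
        ih (fun x hx => h x (List.mem_cons_of_mem a hx))]

theorem alt_core (s : Int) : ∀ (ts : List Int) (d j : Int),
    ((offAux s ts j).all (fun i => (wkAux (daysR ts d) j).contains i)) = good s ts d := by
  intro ts
  induction ts with
  | nil => intro d j; simp [off_nil, good, daysR]
  | cons t ts ih =>
    intro d j
    rw [off_cons]
    have hwk : wkAux (daysR (t :: ts) d) j =
        if d = 6 ∨ d = 7 then j :: wkAux (daysR ts (if d < 7 then d + 1 else d - 6)) (j + 1)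
        else wkAux (daysR ts (if d < 7 then d + 1 else d - 6)) (j + 1) := by
      show wkAux (d :: daysR ts (if d < 7 then d + 1 else d - 6)) j = _
      exact wk_cons _ _ _
    -- membership of an index i ≥ j+1 in the full weekend list equals membership in the tail list
    have htail_mem : ∀ i : Int, j + 1 ≤ i →
        ((wkAux (daysR (t :: ts) d) j).contains i) =
          ((wkAux (daysR ts (if d < 7 then d + 1 else d - 6)) (j + 1)).contains i) := by
      intro i hge
      rw [hwk]
      by_cases h : d = 6 ∨ d = 7
      · rw [if_pos h]
        have : (i == j) = false := by
          rw [beq_eq_false_iff_ne]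
          omega
        simp
        intro heq
        exfalso
        omega
      · rw [if_neg h]
    -- membership of j itself reads off the head day
    have hj_mem : ((wkAux (daysR (t :: ts) d) j).contains j) =
        (decide (d = 6) || decide (d = 7)) := by
      rw [hwk]
      by_cases h : d = 6 ∨ d = 7
      · rw [if_pos h]
        rcases h with h | h <;> simp [h]
      · rw [if_neg h]
        rw [not_or] at h
        have hnot : ¬ (j ∈ wkAux (daysR ts (if d < 7 then d + 1 else d - 6)) (j + 1)) := by
          intro hmem
          have := wk_ge _ _ _ hmem
          omega
        simp [h.1, h.2, hnot]
    have htail_all : ((offAux s ts (j + 1)).all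
          (fun i => (wkAux (daysR (t :: ts) d) j).contains i)) =
        good s ts (if d < 7 then d + 1 else d - 6) := by
      rw [← ih (if d < 7 then d + 1 else d - 6) (j + 1)]
      exact all_congr_mem _ _ _ (fun i hi => htail_mem i (off_ge s ts (j + 1) i hi))
    rw [good]
    by_cases ht : time1Port t > time1Port s + 10
    · rw [if_pos ht, List.all_cons, hj_mem, htail_all]
      have hle : ¬ (time1Port t ≤ time1Port s + 10) := by omega
      simp [hle]
    · rw [if_neg ht, htail_all]
      have hle : time1Port t ≤ time1Port s + 10 := by omega
      simp [hle]

-- ===== VERDICT (by name: the statement is the Claim_ definition above) =====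
theorem check_spec : Claim_equal_check := by
  intro s e d _
  unfold Spec_check check check_alt
  rw [checkGo_eq_good]
  simp only [foldl_daysStep, List.nil_append]
  rw [show weekendIdx (daysR e d) = wkAux (daysR e d) 0 from rfl,
      show offenderIdx (time1Port s + 10) e = offAux s e 0 from rfl,
      alt_core s e d 0]
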